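-- pv_equiv track=rewrite | github.com/Apostolos00tapsas/PyArchive | Algorithms/Sequences/Hofstadter_Q_Sequence.py | HQSeq
-- ===== SOURCE A (Python) =====
-- def HQSeq(n):
--     hqs=[]
--     for i in range(0,n):
--         if i<2:
--             hqs.append(1)
--         else:
--             hqs.append(hqs[i-hqs[i-1]]+hqs[i-hqs[i-2]])
--     return hqs
-- ===== SOURCE B (Python) =====
-- def HQSeq(n):
--     # Top-down memoized recursion: Q(j) transcribes the mathematical definition
--     # Q(j) = Q(j - Q(j-1)) + Q(j - Q(j-2)) (with Q(j) = 1 for j < 2), caching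
--     # each computed term in a list so it is computed once; the result is the
--     # first n values of Q. The cache is local, so calls are independent.
--     memo = []
--
--     def Q(j):
--         if j < len(memo):
--             return memo[j]
--         v = 1 if j < 2 else Q(j - Q(j - 1)) + Q(j - Q(j - 2))
--         memo.append(v)
--         return v
--
--     return [Q(i) for i in range(n)]
-- ===== Notes on version B (the rewrite author's own statement) =====
-- stated objective: alternative
-- what changed: B replaces A's forward DP loop over indices with a top-down memoized recursion Q(j) = Q(j-Q(j-1)) + Q(j-Q(j-2)) that transcribes the mathematical definition directly, using a locally created cache; the result is the first n values of Q.
import Mathlib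
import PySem

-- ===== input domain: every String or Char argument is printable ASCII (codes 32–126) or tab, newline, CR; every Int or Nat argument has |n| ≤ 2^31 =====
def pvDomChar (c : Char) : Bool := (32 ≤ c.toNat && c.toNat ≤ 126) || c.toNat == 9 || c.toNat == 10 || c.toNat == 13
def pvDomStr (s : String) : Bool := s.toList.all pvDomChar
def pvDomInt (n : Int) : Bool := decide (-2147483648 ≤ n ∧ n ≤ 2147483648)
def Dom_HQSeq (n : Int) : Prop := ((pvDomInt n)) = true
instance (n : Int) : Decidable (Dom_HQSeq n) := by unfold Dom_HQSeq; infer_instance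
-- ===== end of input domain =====

-- ===== PORT A =====
-- B replaces A's forward DP loop with a top-down memoized recursion that
-- transcribes Q(j) = Q(j-Q(j-1)) + Q(j-Q(j-2)) directly, with a local cache;
-- return-value equivalence, objective: alternative (same O(n) cost).
-- Both ports carry an Option: `none` marks the Python code's (never-observed)
-- IndexError branch; both ports map it to [] so the claim stays total.
def stepA (st : Option (List Int)) (i : Int) : Option (List Int) :=
  match st with
  | none => none
  | some hqs =>
    if i < 2 then some (hqs ++ [1])
    else
      match PySem.List.pyGet? hqs (i - 1), PySem.List.pyGet? hqs (i - 2) with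
      | some q1, some q2 =>
        match PySem.List.pyGet? hqs (i - q1), PySem.List.pyGet? hqs (i - q2) with
        | some a, some b => some (hqs ++ [a + b])
        | _, _ => none
      | _, _ => none

def HQSeq (n : Int) : List Int :=
  ((PySem.List.pyRange 0 n 1).foldl stepA (some [])).getD []

-- ===== PORT B =====
-- one call of B's recursive Q, threading the cache: on a cache hit the cache
-- is read with Python list indexing (pyGet?), on a miss the value is computed
-- (recursively, in Python's evaluation order) and appended.  `none` = the call
-- raises (IndexError on the cache read) or exceeds the fuel; the fuel bounds
-- the recursion depth only — every run of B's Q that returns, called as HQSeq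
-- calls it, recurses at most 2 deep, so fuel 4 is never exhausted there.
def qB : Nat → List Int → Int → Option (List Int × Int)
  | 0, _, _ => none
  | f + 1, memo, j =>
    if j < (memo.length : Int) then
      (PySem.List.pyGet? memo j).map (fun v => (memo, v))
    else if j < 2 then some (memo ++ [1], 1)
    else
      match qB f memo (j - 1) with
      | none => none
      | some (m1, q1) =>
        match qB f m1 (j - q1) with
        | none => none
        | some (m2, a) =>
          match qB f m2 (j - 2) with
          | none => none
          | some (m3, q2) =>
            match qB f m3 (j - q2) with
            | none => none
            | some (m4, b) => some (m4 ++ [a + b], a + b)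

-- the list comprehension `[Q(i) for i in range(n)]`, threading (cache, output)
def stepB (st : Option (List Int × List Int)) (i : Int) : Option (List Int × List Int) :=
  match st with
  | none => none
  | some (memo, out) =>
    match qB 4 memo i with
    | none => none
    | some (m, v) => some (m, out ++ [v])

def HQSeq_alt (n : Int) : List Int :=
  match (PySem.List.pyRange 0 n 1).foldl stepB (some ([], [])) with
  | none => []
  | some (_, out) => out

-- ===== PRECONDITION & SPEC =====
def Spec_HQSeq (n : Int) (out : List Int) : Prop := out = HQSeq_alt n
instance (n : Int) (out : List Int) : Decidable (Spec_HQSeq n out) := by unfold Spec_HQSeq; infer_instance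

-- ===== CLAIM (what is proved, stated in full; the proofs are below) =====
def Claim_equal_HQSeq : Prop := ∀ (n : Int), Dom_HQSeq n → Spec_HQSeq n (HQSeq n)

-- ===== LEMMAS AND PROOFS =====

-- unfolding equations for qB (one fuel step at a time)
lemma qB_hit (f : Nat) (memo : List Int) (j : Int) (h : j < (memo.length : Int)) :
    qB (f + 1) memo j = (PySem.List.pyGet? memo j).map (fun v => (memo, v)) := by
  simp [qB, h]

lemma qB_rec (f : Nat) (memo : List Int) (j : Int)
    (h1 : ¬ j < (memo.length : Int)) (h2 : ¬ j < 2) :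
    qB (f + 1) memo j =
      (match qB f memo (j - 1) with
      | none => none
      | some (m1, q1) =>
        match qB f m1 (j - q1) with
        | none => none
        | some (m2, a) =>
          match qB f m2 (j - 2) with
          | none => none
          | some (m3, q2) =>
            match qB f m3 (j - q2) with
            | none => none
            | some (m4, b) => some (m4 ++ [a + b], a + b)) := by
  simp [qB, h1, h2]

-- one step: A's loop body and B's top-level Q(i) (i = current length) either
-- both error or both append the same value, which is ≥ 1
lemma stepAgree (l : List Int) (hpos : ∀ x ∈ l, (1:Int) ≤ x) :
    (stepA (some l) (l.length : Int) = none ∧ qB 4 l (l.length : Int) = none) ∨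
    (∃ v : Int, 1 ≤ v ∧ stepA (some l) (l.length : Int) = some (l ++ [v]) ∧
      qB 4 l (l.length : Int) = some (l ++ [v], v)) := by
  by_cases hsmall : ((l.length : Int) < 2)
  · right
    refine ⟨1, le_refl 1, by simp [stepA, hsmall], ?_⟩
    rw [show (4:Nat) = 3 + 1 from rfl, qB]
    simp [hsmall]
  · have hlen : 2 ≤ l.length := by exact_mod_cast not_lt.mp hsmall
    obtain ⟨q1, hq1, hq1m⟩ : ∃ q1, PySem.List.pyGet? l ((l.length : Int) - 1) = some q1 ∧ q1 ∈ l := by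
      rw [show ((l.length : Int) - 1) = ((l.length - 1 : Nat) : Int) by omega,
        PySem.List.pyGet?_natCast]
      exact ⟨_, List.getElem?_eq_getElem (by omega), List.getElem_mem _⟩
    obtain ⟨q2, hq2, hq2m⟩ : ∃ q2, PySem.List.pyGet? l ((l.length : Int) - 2) = some q2 ∧ q2 ∈ l := by
      rw [show ((l.length : Int) - 2) = ((l.length - 2 : Nat) : Int) by omega,
        PySem.List.pyGet?_natCast]
      exact ⟨_, List.getElem?_eq_getElem (by omega), List.getElem_mem _⟩
    have hp1 : (1:Int) ≤ q1 := hpos q1 hq1m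
    have hp2 : (1:Int) ≤ q2 := hpos q2 hq2m
    have e1 : qB 3 l ((l.length : Int) - 1) = some (l, q1) := by
      rw [show (3:Nat) = 2 + 1 from rfl, qB_hit 2 l _ (by omega), hq1]; rfl
    have e2 : qB 3 l ((l.length : Int) - 2) = some (l, q2) := by
      rw [show (3:Nat) = 2 + 1 from rfl, qB_hit 2 l _ (by omega), hq2]; rfl
    have e3 : qB 3 l ((l.length : Int) - q1) =
        (PySem.List.pyGet? l ((l.length : Int) - q1)).map (fun v => (l, v)) := by
      rw [show (3:Nat) = 2 + 1 from rfl, qB_hit 2 l _ (by omega)]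
    have e4 : qB 3 l ((l.length : Int) - q2) =
        (PySem.List.pyGet? l ((l.length : Int) - q2)).map (fun v => (l, v)) := by
      rw [show (3:Nat) = 2 + 1 from rfl, qB_hit 2 l _ (by omega)]
    have hB : qB 4 l (l.length : Int) =
        (match PySem.List.pyGet? l ((l.length : Int) - q1),
               PySem.List.pyGet? l ((l.length : Int) - q2) with
        | some a, some b => some (l ++ [a + b], a + b)
        | _, _ => none) := by
      rw [show (4:Nat) = 3 + 1 from rfl, qB_rec 3 l _ (lt_irrefl _) hsmall, e1]
      cases ha : PySem.List.pyGet? l ((l.length : Int) - q1) with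
      | none => simp [e3, ha]
      | some a =>
        simp only [e3, ha, Option.map_some]
        rw [e2]
        cases hb : PySem.List.pyGet? l ((l.length : Int) - q2) with
        | none => simp [e4, hb]
        | some b => simp [e4, hb]
    have hA : stepA (some l) (l.length : Int) =
        (match PySem.List.pyGet? l ((l.length : Int) - q1),
               PySem.List.pyGet? l ((l.length : Int) - q2) with
        | some a, some b => some (l ++ [a + b])
        | _, _ => none) := by
      simp only [stepA]
      rw [if_neg hsmall, hq1, hq2]
    cases ha : PySem.List.pyGet? l ((l.length : Int) - q1) with
    | none => left; rw [hA, hB, ha]; exact ⟨rfl, rfl⟩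
    | some a =>
      cases hb : PySem.List.pyGet? l ((l.length : Int) - q2) with
      | none => left; rw [hA, hB, ha, hb]; exact ⟨rfl, rfl⟩
      | some b =>
        right
        refine ⟨a + b, ?_, by rw [hA, ha, hb], by rw [hB, ha, hb]⟩
        have := hpos a (PySem.List.mem_of_pyGet?_eq_some l ha)
        have := hpos b (PySem.List.mem_of_pyGet?_eq_some l hb)
        omega

-- simulation: k further iterations of A's loop and k further comprehension
-- steps of B, started from the same cache l (all of whose entries are ≥ 1),
-- either both error or both extend l (and B's output) by the same suffix
lemma sim (k : Nat) (l out : List Int) (hpos : ∀ x ∈ l, (1:Int) ≤ x) :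
    ((PySem.List.pyRange (l.length : Int) ((l.length : Int) + k) 1).foldl stepA (some l) = none ∧
      (PySem.List.pyRange (l.length : Int) ((l.length : Int) + k) 1).foldl stepB (some (l, out)) = none) ∨
    (∃ t, (PySem.List.pyRange (l.length : Int) ((l.length : Int) + k) 1).foldl stepA (some l) = some (l ++ t) ∧
      (PySem.List.pyRange (l.length : Int) ((l.length : Int) + k) 1).foldl stepB (some (l, out)) = some (l ++ t, out ++ t)) := by
  induction k generalizing l out with
  | zero =>
    right
    refine ⟨[], ?_, ?_⟩ <;>
      · rw [PySem.List.pyRange_one_eq_nil (by omega)]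
        simp
  | succ k ih =>
    rw [show ((l.length : Int) + (k + 1 : Nat)) = ((l.length : Int) + 1) + k by push_cast; ring,
      PySem.List.pyRange_one_cons (by omega), List.foldl_cons, List.foldl_cons]
    rcases stepAgree l hpos with ⟨hA, hB⟩ | ⟨v, hv, hA, hB⟩
    · left
      rw [hA, show stepB (some (l, out)) (l.length : Int) = none by rw [stepB, hB]]
      exact ⟨List.foldl_fixed' (fun x => rfl) _, List.foldl_fixed' (fun x => rfl) _⟩
    · rw [hA, show stepB (some (l, out)) (l.length : Int) = some (l ++ [v], out ++ [v]) by
        rw [stepB, hB]]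
      have hpos' : ∀ x ∈ l ++ [v], (1:Int) ≤ x := by
        intro x hx
        rcases List.mem_append.mp hx with h | h
        · exact hpos x h
        · simp at h; omega
      have := ih (l ++ [v]) (out ++ [v]) hpos'
      have harg : (((l ++ [v]).length : Int)) = (l.length : Int) + 1 := by simp
      rw [harg] at this
      rcases this with ⟨h1, h2⟩ | ⟨t, h1, h2⟩
      · exact Or.inl ⟨h1, h2⟩
      · exact Or.inr ⟨v :: t, by simpa using h1, by simpa using h2⟩

-- ===== VERDICT (by name: the statement is the Claim_ definition above) =====
theorem HQSeq_spec : Claim_equal_HQSeq := by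
  intro n _
  unfold Spec_HQSeq HQSeq HQSeq_alt
  by_cases hn : 0 ≤ n
  · have hr : PySem.List.pyRange 0 n 1 = PySem.List.pyRange 0 ((n.toNat : Nat) : Int) 1 := by
      congr 1
      omega
    rw [hr]
    have hsim := sim n.toNat [] [] (by simp)
    simp only [List.length_nil, Nat.cast_zero, zero_add, List.nil_append] at hsim
    rcases hsim with ⟨hA, hB⟩ | ⟨t, hA, hB⟩
    · rw [hA, hB]
      rfl
    · rw [hA, hB]
      rfl
  · rw [PySem.List.pyRange_one_eq_nil (by omega)]
    rfl
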